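-- pv_equiv track=rewrite | github.com/herman97/Kattis | ex7_hidingplaces (search)/hiding.py | get_neighbour
-- ===== SOURCE A (Python) =====
-- def get_neighbour(node):
--     nx = node[0]
--     ny = node[1]
--     neigh = []
--
--     for x in range(-2, 3):
--         for y in range(-2, 3):
--             if ((x == -2 or x == 2) and (y == -1 or y == 1)) or ((y == -2 or y == 2) and (x == -1 or x == 1)):
--                 tx = nx + x
--                 ty = ny + y
--                 if tx > 7 or tx < 0 or ty < 0 or ty > 7:
--                     continue
--                 neigh.append((tx, ty))
--
--     return neigh
-- ===== SOURCE B (Python) =====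
-- def get_neighbour(node):
--     nx, ny = node
--     neigh = []
--     for tx in range(8):
--         for ty in range(8):
--             dx = abs(tx - nx)
--             dy = abs(ty - ny)
--             if (dx == 1 and dy == 2) or (dx == 2 and dy == 1):
--                 neigh.append((tx, ty))
--     return neigh
-- ===== Notes on version B (the rewrite author's own statement) =====
-- stated objective: alternative
-- what changed: B scans the 64 board squares in row-major order and keeps those at knight distance (|dx|,|dy|)={1,2} from the node, instead of generating candidate offsets around the node and bounds-checking them; the orders coincide because A's offsets are enumerated lexicographically.
import Mathlib
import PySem

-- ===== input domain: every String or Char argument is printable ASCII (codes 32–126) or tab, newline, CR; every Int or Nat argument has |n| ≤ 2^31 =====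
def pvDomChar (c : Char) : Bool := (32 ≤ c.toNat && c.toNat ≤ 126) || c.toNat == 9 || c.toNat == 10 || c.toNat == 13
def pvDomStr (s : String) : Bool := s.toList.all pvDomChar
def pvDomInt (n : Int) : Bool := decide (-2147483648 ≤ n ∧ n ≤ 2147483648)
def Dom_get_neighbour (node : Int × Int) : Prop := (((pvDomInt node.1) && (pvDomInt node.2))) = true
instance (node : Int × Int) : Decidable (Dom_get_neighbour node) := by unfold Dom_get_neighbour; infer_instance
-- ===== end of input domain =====

-- B scans the 64 board squares in row-major order and keeps those at knight distance from the node,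
-- instead of generating offset candidates around the node; alternative algorithm, same result.

-- ===== PORT A =====
-- body of A's inner loop, kept as a named helper (A's code step for step)
def gnStep (nx ny x : Int) (neigh : List (Int × Int)) (y : Int) : List (Int × Int) :=
  if ((x = -2 ∨ x = 2) ∧ (y = -1 ∨ y = 1)) ∨ ((y = -2 ∨ y = 2) ∧ (x = -1 ∨ x = 1)) then
    let tx := nx + x
    let ty := ny + y
    if tx > 7 ∨ tx < 0 ∨ ty < 0 ∨ ty > 7 then neigh
    else neigh ++ [(tx, ty)]
  else neigh

-- nested for-loops over range(-2,3), appending when the knight-shape condition holds and the target is on the board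
def get_neighbour (node : Int × Int) : List (Int × Int) :=
  let nx := node.1
  let ny := node.2
  (PySem.List.pyRange (-2) 3 1).foldl (fun neigh x =>
    (PySem.List.pyRange (-2) 3 1).foldl (gnStep nx ny x) neigh) []

-- ===== PORT B =====
-- body of B's inner loop; Python abs on ints is ported as Int.natAbs (exact: only compared to 1 and 2)
def gnAltStep (nx ny tx : Int) (neigh : List (Int × Int)) (ty : Int) : List (Int × Int) :=
  let dx := (tx - nx).natAbs
  let dy := (ty - ny).natAbs
  if (dx = 1 ∧ dy = 2) ∨ (dx = 2 ∧ dy = 1) then neigh ++ [(tx, ty)] else neigh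

-- nested for-loops over the board squares range(8) × range(8), keeping squares at knight distance
def get_neighbour_alt (node : Int × Int) : List (Int × Int) :=
  let nx := node.1
  let ny := node.2
  (PySem.List.pyRange 0 8 1).foldl (fun neigh tx =>
    (PySem.List.pyRange 0 8 1).foldl (gnAltStep nx ny tx) neigh) []

-- ===== PRECONDITION & SPEC =====
def Spec_get_neighbour (node : Int × Int) (out : List (Int × Int)) : Prop := out = get_neighbour_alt node
instance (node : Int × Int) (out : List (Int × Int)) : Decidable (Spec_get_neighbour node out) := by unfold Spec_get_neighbour; infer_instance

-- ===== CLAIM =====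
def Claim_equal_get_neighbour : Prop := ∀ (node : Int × Int), Dom_get_neighbour node → Spec_get_neighbour node (get_neighbour node)

-- ===== LEMMAS AND PROOFS =====
theorem pyRange_m2_3 : PySem.List.pyRange (-2) 3 1 = [-2, -1, 0, 1, 2] := by decide
theorem pyRange_0_8 : PySem.List.pyRange 0 8 1 = [0, 1, 2, 3, 4, 5, 6, 7] := by decide

theorem foldl_id {α β : Type} (f : List α → β → List α) (l : List β) (acc : List α)
    (h : ∀ (acc' : List α) (b : β), b ∈ l → f acc' b = acc') : l.foldl f acc = acc := by
  induction l generalizing acc with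
  | nil => rfl
  | cons b t ih =>
    rw [List.foldl_cons, h acc b (List.mem_cons_self), ih]
    intro acc' b' hb'
    exact h acc' b' (List.mem_cons_of_mem _ hb')

theorem gnStep_out (nx ny x y : Int) (acc : List (Int × Int))
    (h : nx + x > 7 ∨ nx + x < 0 ∨ ny + y < 0 ∨ ny + y > 7) :
    gnStep nx ny x acc y = acc := by
  unfold gnStep
  split_ifs with hs
  · show (if nx + x > 7 ∨ nx + x < 0 ∨ ny + y < 0 ∨ ny + y > 7 then acc
          else acc ++ [(nx + x, ny + y)]) = acc
    rw [if_pos h]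
  · rfl

theorem A_empty (nx ny : Int) (hOut : nx < -2 ∨ 9 < nx ∨ ny < -2 ∨ 9 < ny) :
    get_neighbour (nx, ny) = [] := by
  simp only [get_neighbour]
  apply foldl_id
  intro acc x hx
  rw [pyRange_m2_3] at hx
  have hx' : -2 ≤ x ∧ x ≤ 2 := by fin_cases hx <;> norm_num
  apply foldl_id
  intro acc' y hy
  rw [pyRange_m2_3] at hy
  have hy' : -2 ≤ y ∧ y ≤ 2 := by fin_cases hy <;> norm_num
  exact gnStep_out _ _ _ _ _ (by omega)

theorem gnAltStep_out (nx ny tx ty : Int) (acc : List (Int × Int))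
    (h : ¬(((tx - nx).natAbs = 1 ∧ (ty - ny).natAbs = 2) ∨
           ((tx - nx).natAbs = 2 ∧ (ty - ny).natAbs = 1))) :
    gnAltStep nx ny tx acc ty = acc := by
  simp only [gnAltStep, if_neg h]

theorem B_empty (nx ny : Int) (hOut : nx < -2 ∨ 9 < nx ∨ ny < -2 ∨ 9 < ny) :
    get_neighbour_alt (nx, ny) = [] := by
  simp only [get_neighbour_alt]
  apply foldl_id
  intro acc tx htx
  rw [pyRange_0_8] at htx
  have htx' : 0 ≤ tx ∧ tx ≤ 7 := by fin_cases htx <;> norm_num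
  apply foldl_id
  intro acc' ty hty
  rw [pyRange_0_8] at hty
  have hty' : 0 ≤ ty ∧ ty ≤ 7 := by fin_cases hty <;> norm_num
  exact gnAltStep_out _ _ _ _ _ (by omega)

-- ===== VERDICT =====
set_option maxHeartbeats 2000000 in
theorem get_neighbour_spec : Claim_equal_get_neighbour := by
  intro ⟨nx, ny⟩ _
  show get_neighbour (nx, ny) = get_neighbour_alt (nx, ny)
  by_cases h : -2 ≤ nx ∧ nx ≤ 9 ∧ -2 ≤ ny ∧ ny ≤ 9
  · obtain ⟨h1, h2, h3, h4⟩ := h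
    interval_cases nx <;> interval_cases ny <;> decide
  · have hOut : nx < -2 ∨ 9 < nx ∨ ny < -2 ∨ 9 < ny := by omega
    rw [A_empty _ _ hOut, B_empty _ _ hOut]
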